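-- pv_equiv track=rewrite | github.com/posl/comment_recommendation | script/split_gen/1_time/zh/176_C/6.py | solve
-- ===== SOURCE A (Python) =====
-- def solve(n, a):
--     # 从左到右遍历，记录目前为止最高的人的高度
--     # 只有当当前人的高度小于目前为止最高的人的高度时，才需要站在目前为止最高的人的头上
--     # 因为如果当前人的高度大于目前为止最高的人的高度，那么当前人就可以站在地上了
--     # 这样就不需要站在目前为止最高的人的头上了
--     # 这样就可以保证站在目前为止最高的人的头上的人的高度是非递减的
--     # 这样就可以保证每个人的高度都不小于前面的人的高度
--     max_height = 0
--     ans = 0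
--     for i in range(n):
--         if a[i] < max_height:
--             ans += max_height - a[i]
--         else:
--             max_height = a[i]
--     return ans
-- ===== SOURCE B (Python) =====
-- def solve(n, a):
--     # Divide and conquer: go(seg, m) returns (total deficit inside seg given
--     # incoming max m, resulting max) by splitting seg in half and threading
--     # the left half's max into the right half.
--     def go(seg, m):
--         if not seg:
--             return 0, m
--         if len(seg) == 1:
--             x = seg[0]
--             return (m - x, m) if x < m else (0, x)
--         mid = len(seg) // 2
--         dl, ml = go(seg[:mid], m)
--         dr, mr = go(seg[mid:], ml)
--         return dl + dr, mr
--     return go(a[:max(n, 0)], 0)[0]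
-- ===== Notes on version B (the rewrite author's own statement) =====
-- stated objective: alternative
-- what changed: Replaces A's single fused left-to-right loop with a divide-and-conquer recursion: each half is solved independently, returning (deficit, max), with the left half's maximum threaded into the right half.
-- outside the precondition, e.g. on solve(3, [1]): A raises IndexError, B returns 0
import Mathlib
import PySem

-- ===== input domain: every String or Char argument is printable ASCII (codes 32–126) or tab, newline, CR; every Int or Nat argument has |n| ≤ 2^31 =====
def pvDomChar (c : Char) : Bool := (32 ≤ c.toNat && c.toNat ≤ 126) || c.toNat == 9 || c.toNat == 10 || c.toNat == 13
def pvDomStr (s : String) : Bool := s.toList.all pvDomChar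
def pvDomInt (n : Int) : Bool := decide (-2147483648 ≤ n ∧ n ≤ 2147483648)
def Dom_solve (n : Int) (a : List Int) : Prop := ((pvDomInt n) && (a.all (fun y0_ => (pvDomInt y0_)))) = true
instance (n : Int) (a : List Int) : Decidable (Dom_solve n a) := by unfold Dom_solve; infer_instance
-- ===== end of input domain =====

-- B replaces A's fused left-to-right loop by a divide-and-conquer recursion (objective: alternative).

-- ===== PORT A =====
-- Literal port of A's index loop; 'a[i]' is in range for every visited i under
-- Pre_solve (n ≤ len a), so pyGetD's default is never used.
def solve (n : Int) (a : List Int) : Int :=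
  ((PySem.List.pyRange 0 n 1).foldl
    (fun (st : Int × Int) i =>
      let ai := PySem.List.pyGetD a i 0
      if ai < st.1 then (st.1, st.2 + (st.1 - ai)) else (ai, st.2))
    (0, 0)).2

-- ===== PORT B =====
-- go seg m = B's inner recursion: (deficit in seg given incoming max m, resulting max).
-- seg[:mid] / seg[mid:] with 0 ≤ mid ≤ len seg are exactly List.take / List.drop.
def go (seg : List Int) (m : Int) : Int × Int :=
  match seg with
  | [] => (0, m)
  | [x] => if x < m then (m - x, m) else (0, x)
  | x :: y :: rest =>
    let mid := (x :: y :: rest).length / 2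
    let l := go ((x :: y :: rest).take mid) m
    let r := go ((x :: y :: rest).drop mid) l.2
    (l.1 + r.1, r.2)
termination_by seg.length
decreasing_by
  · simp [List.length_take]; omega
  · simp; omega

def solve_alt (n : Int) (a : List Int) : Int :=
  (go (PySem.List.slice a none (some (max n 0))) 0).1   -- a[:max(n,0)]

-- ===== PRECONDITION & SPEC =====
-- Pre_ excludes only n > len(a), where A raises IndexError.
def Pre_solve (n : Int) (a : List Int) : Prop := n ≤ (a.length : Int)
instance (n : Int) (a : List Int) : Decidable (Pre_solve n a) := by unfold Pre_solve; infer_instance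
def pvWitness_solve : Int × List Int := (4, [2, 1, 5, 3])

def Spec_solve (n : Int) (a : List Int) (out : Int) : Prop := out = solve_alt n a
instance (n : Int) (a : List Int) (out : Int) : Decidable (Spec_solve n a out) := by unfold Spec_solve; infer_instance

-- ===== CLAIM (what is proved, stated in full; the proofs are below) =====
def Claim_equal_solve : Prop := ∀ (n : Int) (a : List Int), Dom_solve n a → Pre_solve n a → Spec_solve n a (solve n a)

-- ===== LEMMAS AND PROOFS =====

/-- A's loop body as a fold over the visited elements themselves. -/
def stepA (st : Int × Int) (x : Int) : Int × Int :=
  if x < st.1 then (st.1, st.2 + (st.1 - x)) else (x, st.2)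

/-- Index fold with `pyGetD t` over `range(len t)` is the element fold. -/
theorem foldl_pyGetD_len (t : List Int) (n : Int) (hn : ((t.length : Int)) = n) (init : Int × Int) :
    (PySem.List.pyRange 0 n 1).foldl (fun st i => stepA st (PySem.List.pyGetD t i 0)) init
      = t.foldl stepA init := by
  subst hn
  exact PySem.List.foldl_pyRange_zero_pyGetD' t 0 stepA init

/-- A's index loop equals a fold of `stepA` over the first `n` elements. -/
theorem solve_eq_foldl_take (n : Int) (a : List Int) (h0 : 0 ≤ n) (h : n ≤ (a.length : Int)) :
    solve n a = ((a.take n.toNat).foldl stepA (0, 0)).2 := by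
  unfold solve
  have hlen : ((a.take n.toNat).length : Int) = n := by
    simp [List.length_take]
    omega
  have hcongr :
      (PySem.List.pyRange 0 n 1).foldl
        (fun (st : Int × Int) i =>
          let ai := PySem.List.pyGetD a i 0
          if ai < st.1 then (st.1, st.2 + (st.1 - ai)) else (ai, st.2)) (0, 0)
      = (PySem.List.pyRange 0 n 1).foldl
        (fun (st : Int × Int) i => stepA st (PySem.List.pyGetD (a.take n.toNat) i 0)) (0, 0) := by
    refine PySem.List.foldl_congr_mem _ _ _ _ (fun st i hi => ?_)
    have hmem := (PySem.List.mem_pyRange_one).1 hi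
    have h1 : PySem.List.pyGetD a i 0 = PySem.List.pyGetD (a.take n.toNat) i 0 := by
      rw [PySem.List.pyGetD_eq_getElem a 0 hmem.1 (by omega),
          PySem.List.pyGetD_eq_getElem (a.take n.toNat) 0 hmem.1 (by omega)]
      rw [List.getElem_take]
    simp [stepA, h1]
  rw [hcongr]
  exact congrArg Prod.snd (foldl_pyGetD_len (a.take n.toNat) n hlen (0, 0))

/-- The D&C recursion computes exactly A's linear fold: max in `.2`, deficit added in `.1`.
    Strong induction on the length bound `N`. -/
theorem go_spec_aux (N : Nat) : ∀ (seg : List Int), seg.length ≤ N → ∀ (m ans : Int),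
    seg.foldl stepA (m, ans) = ((go seg m).2, ans + (go seg m).1) := by
  induction N with
  | zero =>
    intro seg hlen m ans
    have : seg = [] := List.eq_nil_of_length_eq_zero (Nat.le_zero.mp hlen)
    subst this; simp [go]
  | succ N ih =>
    intro seg hlen m ans
    match seg with
    | [] => simp [go]
    | [x] => by_cases hx : x < m <;> simp [go, stepA, hx]
    | x :: y :: rest =>
      set s := x :: y :: rest with hs
      set mid := s.length / 2 with hmid
      have hslen : 2 ≤ s.length := by simp [hs]
      have htake : (s.take mid).length ≤ N := by simp [List.length_take]; omega
      have hdrop : (s.drop mid).length ≤ N := by simp; omega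
      calc s.foldl stepA (m, ans)
          = (s.drop mid).foldl stepA ((s.take mid).foldl stepA (m, ans)) := by
            conv_lhs => rw [(List.take_append_drop mid s).symm]
            rw [List.foldl_append]
        _ = ((go s m).2, ans + (go s m).1) := by
            rw [ih _ htake m ans,
                ih _ hdrop (go (s.take mid) m).2 (ans + (go (s.take mid) m).1)]
            have hm : rest.length + 1 + 1 = s.length := by simp [hs]
            rw [hs, go]
            simp only [List.length_cons, hm, ← hmid, Prod.mk.injEq]
            exact ⟨trivial, by ring⟩

theorem go_spec (seg : List Int) (m ans : Int) :
    seg.foldl stepA (m, ans) = ((go seg m).2, ans + (go seg m).1) :=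
  go_spec_aux seg.length seg le_rfl m ans

/-- B unfolded on the nonnegative case. -/
theorem solve_alt_eq (n : Int) (a : List Int) (h0 : 0 ≤ n) :
    solve_alt n a = (go (a.take n.toNat) 0).1 := by
  unfold solve_alt
  rw [max_eq_left h0, PySem.List.slice_to a h0]

-- ===== VERDICT (by name: the statement is the Claim_ definition above) =====
theorem solve_spec : Claim_equal_solve := by
  intro n a _ hpre
  unfold Spec_solve
  by_cases h0 : 0 ≤ n
  · rw [solve_eq_foldl_take n a h0 hpre, solve_alt_eq n a h0, go_spec]
    simp
  · unfold solve solve_alt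
    rw [PySem.List.pyRange_one_eq_nil (by omega), max_eq_right (by omega : n ≤ 0),
        PySem.List.slice_to a le_rfl]
    simp [go]
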